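-- pv_equiv track=rewrite | github.com/571530/MAT102 | Obliger/Oblig2/Oppgaver.py | fraTekstTilTall
-- ===== SOURCE A (Python) =====
-- def fraTekstTilTall(tekst):
--     # Del opp strengen i strenger med lengde 4
--     delt_tekst = [tekst[start:start+4] for start in range(0, len(tekst), 4)]
--
--     res = []
--     for mld in delt_tekst:
--         tall = 0
--         i = 0
--         for ch in mld[::-1]: # gå gjennom baklengs
--             if ch == ' ':
--                 tall += 99 * 10**i
--             else:
--                 tall += (ord(ch) - ord('A')) * 10**i
--             i+=2
--         res.append(tall)
--     return res
-- ===== SOURCE B (Python) =====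
-- def fraTekstTilTall(tekst):
--     def enc(chunk):
--         tall = 0
--         for ch in chunk:
--             tall = tall * 100 + (99 if ch == ' ' else ord(ch) - ord('A'))
--         return tall
--     return [enc(tekst[start:start+4]) for start in range(0, len(tekst), 4)]
-- ===== Notes on version B (the rewrite author's own statement) =====
-- stated objective: simpler
-- what changed: Each 4-char chunk is encoded by a forward Horner accumulation (tall = tall*100 + v) instead of iterating over the reversed chunk with a position counter and a 10**i power recomputed per character; the reversal slice and the exponentiations disappear.
import Mathlib
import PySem

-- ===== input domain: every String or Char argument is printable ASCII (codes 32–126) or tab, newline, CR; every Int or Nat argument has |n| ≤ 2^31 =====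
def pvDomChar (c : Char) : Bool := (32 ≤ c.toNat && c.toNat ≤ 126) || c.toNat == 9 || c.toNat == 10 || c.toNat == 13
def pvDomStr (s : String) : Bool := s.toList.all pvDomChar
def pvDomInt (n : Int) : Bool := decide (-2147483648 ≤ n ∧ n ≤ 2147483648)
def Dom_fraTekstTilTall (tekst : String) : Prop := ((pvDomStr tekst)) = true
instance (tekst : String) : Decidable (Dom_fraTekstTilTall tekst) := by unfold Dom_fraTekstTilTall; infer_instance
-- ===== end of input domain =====

-- B replaces the reversed-iteration-with-powers chunk encoding by a forward Horner accumulation (simpler; same O(n) cost).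

-- ===== PORT A =====
-- literal port of A: chunk into 4s, then for each chunk iterate over its reversal
-- with accumulator tall and counter i, adding v(ch) * 10^i and stepping i by 2.
def fraTekstTilTall (tekst : String) : List Int :=
  let delt_tekst :=
    (PySem.List.pyRange 0 (tekst.toList.length : Int) 4).map
      (fun start => PySem.List.slice tekst.toList (some start) (some (start + 4)))
  delt_tekst.foldl
    (fun res mld =>
      let p :=
        (((PySem.List.slice? mld none none (-1)).getD []).foldl
          (fun (p : Int × Nat) ch =>
            (p.1 + (if ch = ' ' then (99 : Int) else (ch.toNat : Int) - 65) * 10 ^ p.2,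
             p.2 + 2))
          (0, 0))
      res ++ [p.1]) []

-- ===== PORT B =====
-- literal port of B: Horner fold over the chunk, left to right.
def pvEncAlt (chunk : List Char) : Int :=
  chunk.foldl
    (fun tall ch => tall * 100 + (if ch = ' ' then (99 : Int) else (ch.toNat : Int) - 65)) 0

def fraTekstTilTall_alt (tekst : String) : List Int :=
  (PySem.List.pyRange 0 (tekst.toList.length : Int) 4).map
    (fun start => pvEncAlt (PySem.List.slice tekst.toList (some start) (some (start + 4))))

-- ===== PRECONDITION & SPEC =====
def Spec_fraTekstTilTall (tekst : String) (out : List Int) : Prop := out = fraTekstTilTall_alt tekst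
instance (tekst : String) (out : List Int) : Decidable (Spec_fraTekstTilTall tekst out) := by unfold Spec_fraTekstTilTall; infer_instance

-- ===== CLAIM (what is proved, stated in full; the proofs are below) =====
def Claim_equal_fraTekstTilTall : Prop := ∀ (tekst : String), Dom_fraTekstTilTall tekst → Spec_fraTekstTilTall tekst (fraTekstTilTall tekst)

-- ===== LEMMAS AND PROOFS =====

def pvV (ch : Char) : Int := if ch = ' ' then (99 : Int) else (ch.toNat : Int) - 65

-- Horner fold with a general initial accumulator.
theorem pvHorner_init (l : List Char) (a : Int) :
    l.foldl (fun tall ch => tall * 100 + pvV ch) a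
      = a * 100 ^ l.length + l.foldl (fun tall ch => tall * 100 + pvV ch) 0 := by
  induction l generalizing a with
  | nil => simp
  | cons c rest ih =>
    simp only [List.foldl_cons, List.length_cons]
    rw [ih (a * 100 + pvV c), ih (0 * 100 + pvV c)]
    ring

-- A's inner loop over the reversed chunk, characterised via B's Horner value.
theorem pvInner_eq (l : List Char) (t : Int) (i : Nat) :
    l.reverse.foldl
        (fun (p : Int × Nat) ch => (p.1 + pvV ch * 10 ^ p.2, p.2 + 2)) (t, i)
      = (t + (l.foldl (fun tall ch => tall * 100 + pvV ch) 0) * 10 ^ i, i + 2 * l.length) := by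
  induction l generalizing t i with
  | nil => simp
  | cons c rest ih =>
    simp only [List.reverse_cons, List.foldl_append, List.foldl_cons, List.foldl_nil,
      List.length_cons]
    rw [ih t i, pvHorner_init rest (0 * 100 + pvV c)]
    simp only [Prod.mk.injEq]
    refine ⟨?_, by omega⟩
    have hpow : (10 : Int) ^ (i + 2 * rest.length) = 10 ^ i * 100 ^ rest.length := by
      rw [pow_add, pow_mul]; norm_num
    simp only [hpow]; ring

-- one chunk: A's reversed fold equals B's Horner value.
theorem pvChunk (mld : List Char) :
    (mld.reverse.foldl
      (fun (p : Int × Nat) ch =>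
        (p.1 + (if ch = ' ' then (99 : Int) else (ch.toNat : Int) - 65) * 10 ^ p.2, p.2 + 2))
      (0, 0)).1 = pvEncAlt mld := by
  have h : (fun (p : Int × Nat) ch =>
        (p.1 + (if ch = ' ' then (99 : Int) else (ch.toNat : Int) - 65) * 10 ^ p.2, p.2 + 2))
      = (fun (p : Int × Nat) ch => (p.1 + pvV ch * 10 ^ p.2, p.2 + 2)) := by
    funext p ch; simp [pvV]
  rw [h, pvInner_eq]
  simp [pvEncAlt, pvV]

-- A's result-list accumulation is B's map.
theorem pvFoldA (l : List (List Char)) (init : List Int) :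
    l.foldl
      (fun res mld =>
        res ++ [(mld.reverse.foldl
          (fun (p : Int × Nat) ch =>
            (p.1 + (if ch = ' ' then (99 : Int) else (ch.toNat : Int) - 65) * 10 ^ p.2, p.2 + 2))
          (0, 0)).1]) init
    = init ++ l.map pvEncAlt := by
  induction l generalizing init with
  | nil => simp
  | cons x xs ih =>
    simp only [List.foldl_cons, List.map_cons]
    rw [ih, pvChunk]
    simp

-- ===== VERDICT (by name: the statement is the Claim_ definition above) =====
theorem fraTekstTilTall_spec : Claim_equal_fraTekstTilTall := by
  intro tekst _
  unfold Spec_fraTekstTilTall fraTekstTilTall fraTekstTilTall_alt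
  simp only [PySem.List.slice?_none_none_neg_one, Option.getD_some]
  rw [pvFoldA]
  simp [List.map_map]
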